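-- pv_equiv track=rewrite | github.com/rhit-martina9/AoC_2023 | day14.py | roll_row_west
-- ===== SOURCE A (Python) =====
-- def roll_row_west(row):
--     row = "".join(row)
--     for j in range(len(row)):
--         if row[j] != "O":
--             round_x = row[j:].find("O")+j
--             still_x = row[j:].find("#")+j
--             if round_x != j-1 and (still_x == j-1 or (j < still_x and round_x < still_x)):
--                 row = row[:j] + "O" + row[j+1:round_x] + "." + row[round_x+1:]
--     return [*row]
-- ===== SOURCE B (Python) =====
-- def roll_row_west(row):
--     # single pass over the joined row, buffering each '#'-free segment:
--     # a segment with k round rocks becomes k 'O's followed by its remaining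
--     # chars (each original 'O' there replaced by '.').
--     res = []
--     seg = []
--     for c in "".join(row):
--         if c == '#':
--             k = seg.count('O')
--             res += ['O'] * k
--             res += ['.' if x == 'O' else x for x in seg[k:]]
--             res.append('#')
--             seg = []
--         else:
--             seg.append(c)
--     k = seg.count('O')
--     res += ['O'] * k
--     res += ['.' if x == 'O' else x for x in seg[k:]]
--     return res
-- ===== Notes on version B (the rewrite author's own statement) =====
-- stated objective: faster
-- what changed: A rescans the whole string and rebuilds it by slicing at every index (quadratic pull-next-rock-to-here); B makes one pass that buffers each '#'-delimited segment and emits its O-count up front, the rest dotted.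
import Mathlib
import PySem

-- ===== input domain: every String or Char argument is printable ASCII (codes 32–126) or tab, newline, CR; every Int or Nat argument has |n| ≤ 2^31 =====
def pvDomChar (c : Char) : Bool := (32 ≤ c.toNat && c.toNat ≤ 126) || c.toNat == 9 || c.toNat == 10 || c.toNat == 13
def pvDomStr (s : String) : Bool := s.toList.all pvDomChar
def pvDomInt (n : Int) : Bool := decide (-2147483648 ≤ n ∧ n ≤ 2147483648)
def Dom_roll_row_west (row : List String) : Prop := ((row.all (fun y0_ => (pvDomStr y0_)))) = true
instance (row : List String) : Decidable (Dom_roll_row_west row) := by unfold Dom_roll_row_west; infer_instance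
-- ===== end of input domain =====

-- B replaces A's quadratic rescan-and-rebuild with one linear pass over '#'-delimited segments (measured asymptotic speed-up).

-- ===== PORT A =====
-- one iteration of A's `for j in range(len(row))` body; the string is a List Char
-- (row[j] is in range for every j the loop visits, so the getD default is never read)
def stepA (s : List Char) (j : Nat) : List Char :=
  if s.getD j ' ' ≠ 'O' then
    let round_x : Int := PySem.Chars.find (PySem.List.slice s (some (j : Int)) none) ['O'] + (j : Int)
    let still_x : Int := PySem.Chars.find (PySem.List.slice s (some (j : Int)) none) ['#'] + (j : Int)
    if round_x ≠ (j : Int) - 1 ∧ (still_x = (j : Int) - 1 ∨ ((j : Int) < still_x ∧ round_x < still_x)) then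
      PySem.List.slice s none (some (j : Int)) ++ 'O' ::
        (PySem.List.slice s (some ((j : Int) + 1)) (some round_x) ++ '.' ::
          PySem.List.slice s (some (round_x + 1)) none)
    else s
  else s

def roll_row_west (row : List String) : List String :=
  let s0 := row.flatMap String.toList            -- row = "".join(row)
  let s := (List.range s0.length).foldl stepA s0 -- the for-loop over j
  s.map (fun c => String.ofList [c])             -- return [*row]

-- ===== PORT B =====
-- flush of the segment buffer: k 'O's, then the rest of the segment dotted
def fillSeg (seg : List Char) : List Char :=
  List.replicate (seg.count 'O') 'O' ++
    (seg.drop (seg.count 'O')).map (fun x => if x = 'O' then '.' else x)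

-- the single pass: `seg` is the buffer of the current '#'-free segment
def rollGo (seg : List Char) : List Char → List Char
  | [] => fillSeg seg
  | c :: rest => if c = '#' then fillSeg seg ++ '#' :: rollGo [] rest
                 else rollGo (seg ++ [c]) rest

def roll_row_west_alt (row : List String) : List String :=
  (rollGo [] (row.flatMap String.toList)).map (fun c => String.ofList [c])

-- ===== PRECONDITION & SPEC =====
def Spec_roll_row_west (row : List String) (out : List String) : Prop := out = roll_row_west_alt row
instance (row : List String) (out : List String) : Decidable (Spec_roll_row_west row out) := by unfold Spec_roll_row_west; infer_instance

-- ===== CLAIM (what is proved, stated in full; the proofs are below) =====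
def Claim_equal_roll_row_west : Prop := ∀ (row : List String), Dom_roll_row_west row → Spec_roll_row_west row (roll_row_west row)

-- ===== LEMMAS AND PROOFS =====

-- `fun x => if x = 'O' then '.' else x` is abbreviated nowhere: it is written out, as in the port.

-- ---- generalities about find on a one-character needle ----

theorem singleton_prefix_iff (t : List Char) (c : Char) : [c] <+: t ↔ t.head? = some c := by
  cases t <;> simp [List.cons_prefix_cons, eq_comm]

theorem find_single_of_not_mem (t : List Char) (c : Char) (h : c ∉ t) :
    PySem.Chars.find t [c] = -1 := by
  rw [PySem.Chars.find_eq_neg_one_iff]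
  intro hinf
  exact h (hinf.sublist.subset (by simp))

theorem find_single_mem (t : List Char) (c : Char) (h : c ∈ t) :
    ∃ r : Nat, PySem.Chars.find t [c] = (r : Int) ∧ t[r]? = some c ∧
      ∀ m, m < r → t[m]? ≠ some c := by
  obtain ⟨pre, suf, rfl⟩ := List.append_of_mem h
  have hinf : [c] <:+: pre ++ c :: suf := ⟨pre, suf, by simp⟩
  have h0 : 0 ≤ PySem.Chars.find (pre ++ c :: suf) [c] :=
    (PySem.Chars.find_nonneg_iff _ _).mpr hinf
  obtain ⟨hp, hmin⟩ := PySem.Chars.find_spec h0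
  refine ⟨(PySem.Chars.find (pre ++ c :: suf) [c]).toNat, (Int.toNat_of_nonneg h0).symm, ?_, ?_⟩
  · have := (singleton_prefix_iff _ _).mp hp
    rwa [List.head?_drop] at this
  · intro m hm hc2
    exact hmin m hm ((singleton_prefix_iff _ _).mpr (by rwa [List.head?_drop]))

theorem find_single_eq (t : List Char) (c : Char) (r : Nat)
    (h1 : t[r]? = some c) (h2 : ∀ m, m < r → t[m]? ≠ some c) :
    PySem.Chars.find t [c] = (r : Int) := by
  have hmem : c ∈ t := List.mem_of_getElem? h1
  obtain ⟨r2, heq, h1b, h2b⟩ := find_single_mem t c hmem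
  rcases lt_trichotomy r r2 with h | h | h
  · exact absurd h1 (h2b r h)
  · rw [heq, h]
  · exact absurd h1b (h2 r2 h)

-- ---- facts about fillSeg ----

theorem count_map_dotO (l : List Char) :
    (l.map (fun x => if x = 'O' then '.' else x)).count 'O' = 0 := by
  rw [List.count_eq_zero]
  intro hmem
  simp only [List.mem_map] at hmem
  obtain ⟨x, -, heq⟩ := hmem
  split_ifs at heq with hx
  · exact absurd heq (by decide)
  · exact hx heq

theorem fillSeg_length (u : List Char) : (fillSeg u).length = u.length := by
  have := List.count_le_length (a := 'O') (l := u)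
  simp [fillSeg]
  omega

theorem fillSeg_take_le (u : List Char) (j : Nat) (hj : j ≤ u.count 'O') :
    (fillSeg u).take j = List.replicate j 'O' := by
  rw [fillSeg, List.take_append]
  simp [List.take_replicate, Nat.min_eq_left hj, Nat.sub_eq_zero_of_le hj]

theorem fillSeg_take_count (u : List Char) (j : Nat) :
    ((fillSeg u).take j).count 'O' = min j (u.count 'O') := by
  rcases Nat.lt_or_ge (u.count 'O') j with h | h
  · rw [fillSeg, List.take_append]
    have h2 := ((List.take_sublist (j - u.count 'O')
        (List.drop (u.count 'O') (u.map (fun x => if x = 'O' then '.' else x)))).trans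
      (List.drop_sublist _ _)).count_le 'O'
    rw [count_map_dotO] at h2
    simp [List.count_append, List.take_replicate, Nat.min_eq_right (Nat.le_of_lt h)]
    omega
  · rw [fillSeg_take_le u j h]
    simp
    omega

theorem fillSeg_getElem?_ge (u : List Char) (j : Nat) (hk : u.count 'O' ≤ j) (hj : j < u.length) :
    (fillSeg u)[j]? = some (if u[j] = 'O' then '.' else u[j]) := by
  rw [fillSeg, List.getElem?_append_right (by simp; omega)]
  have hx : u.count 'O' + (j - u.count 'O') = j := by omega
  simp [List.getElem?_map, List.getElem?_drop, hx, List.getElem?_eq_getElem hj]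

-- ---- facts about rollGo ----

theorem rollGo_no_hash (t : List Char) : ∀ seg, '#' ∉ t → rollGo seg t = fillSeg (seg ++ t) := by
  induction t with
  | nil => intro seg _; simp [rollGo]
  | cons c rest ih =>
    intro seg h
    have hc : ¬ c = '#' := by rintro rfl; exact h (by simp)
    rw [rollGo, if_neg hc, ih (seg ++ [c]) (fun hm => h (List.mem_cons_of_mem _ hm))]
    simp

theorem rollGo_split (t : List Char) : ∀ seg v, '#' ∉ t →
    rollGo seg (t ++ '#' :: v) = fillSeg (seg ++ t) ++ '#' :: rollGo [] v := by
  induction t with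
  | nil =>
    intro seg v _
    simp [rollGo]
  | cons c rest ih =>
    intro seg v h
    have hc : ¬ c = '#' := by rintro rfl; exact h (by simp)
    rw [List.cons_append, rollGo, if_neg hc,
      ih (seg ++ [c]) v (fun hm => h (List.mem_cons_of_mem _ hm))]
    simp

-- ---- unfolding stepA ----

-- when the guard fires: pull the first 'O' (at offset r of the suffix) to position j
theorem stepA_fire (s : List Char) (j r : Nat) (c : Char) (hc : s[j]? = some c) (hO : c ≠ 'O')
    (hf : PySem.Chars.find (s.drop j) ['O'] = (r : Int))
    (hguard : PySem.Chars.find (s.drop j) ['#'] = -1 ∨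
      (0 < PySem.Chars.find (s.drop j) ['#'] ∧ (r : Int) < PySem.Chars.find (s.drop j) ['#'])) :
    stepA s j = s.take j ++ 'O' :: ((s.drop (j + 1)).take (r - 1) ++ '.' :: s.drop (r + j + 1)) := by
  have hg1 : -1 ≤ PySem.Chars.find (s.drop j) ['#'] := PySem.Chars.neg_one_le_find _ _
  unfold stepA
  simp only [List.getD_eq_getElem?_getD, hc, Option.getD_some, PySem.List.slice_from_natCast, hf]
  rw [if_pos hO, if_pos (by constructor <;> [omega; rcases hguard with h | h <;> [rw [h]; skip] <;> omega])]
  have e1 : (j : Int) + 1 = ((j + 1 : Nat) : Int) := by push_cast; ring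
  have e2 : (r : Int) + (j : Int) = ((r + j : Nat) : Int) := by push_cast; ring
  rw [e1, e2, PySem.List.slice_natCast]
  have e3 : ((r + j : Nat) : Int) + 1 = ((r + j + 1 : Nat) : Int) := by push_cast; ring
  rw [e3, PySem.List.slice_from_natCast, PySem.List.slice_to_natCast]
  have e4 : r + j - (j + 1) = r - 1 := by omega
  rw [e4]

-- no move when the scanned position holds an 'O'
theorem stepA_skip_O (s : List Char) (j : Nat) (hc : s[j]? = some 'O') : stepA s j = s := by
  unfold stepA
  simp [List.getD_eq_getElem?_getD, hc]

-- no move when the guard is false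
theorem stepA_skip (s : List Char) (j : Nat) (c : Char) (hc : s[j]? = some c) (hO : c ≠ 'O')
    (hng : PySem.Chars.find (s.drop j) ['O'] = -1 ∨
      (PySem.Chars.find (s.drop j) ['#'] ≠ -1 ∧
        (PySem.Chars.find (s.drop j) ['#'] ≤ 0 ∨
          PySem.Chars.find (s.drop j) ['#'] ≤ PySem.Chars.find (s.drop j) ['O']))) :
    stepA s j = s := by
  unfold stepA
  simp only [List.getD_eq_getElem?_getD, hc, Option.getD_some, PySem.List.slice_from_natCast]
  rw [if_pos hO, if_neg (by rintro ⟨h1, h2 | h2⟩ <;> omega)]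

-- ---- small utilities ----

theorem drop_append_le {a : Type} (u t : List a) (j : Nat) (h : j ≤ u.length) :
    (u ++ t).drop j = u.drop j ++ t := by
  rw [List.drop_append, Nat.sub_eq_zero_of_le h]
  simp

theorem take_append_le {a : Type} (u t : List a) (j : Nat) (h : j ≤ u.length) :
    (u ++ t).take j = u.take j := by
  rw [List.take_append, Nat.sub_eq_zero_of_le h]
  simp

theorem firstO (t : List Char) (c : Char) (h0 : t[0]? = some c) (hcO : c ≠ 'O') (hm : 'O' ∈ t) :
    ∃ r : Nat, PySem.Chars.find t ['O'] = (r : Int) ∧ 1 ≤ r ∧ r < t.length ∧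
      t[r]? = some 'O' ∧ ∀ m, m < r → t[m]? ≠ some 'O' := by
  obtain ⟨r, hf, h1, h2⟩ := find_single_mem t 'O' hm
  have hlen : r < t.length := (List.getElem?_eq_some_iff.mp h1).1
  have hr1 : 1 ≤ r := by
    rcases Nat.eq_zero_or_pos r with rfl | h
    · rw [h0] at h1
      exact absurd (Option.some.inj h1) hcO
    · exact h
  exact ⟨r, hf, hr1, hlen, h1, h2⟩

-- ---- single-step facts about stepA ----

-- a step at an index inside a '#'-free prefix acts on that prefix alone
theorem stepA_prefix (u v : List Char) (j : Nat) (hu : '#' ∉ u) (hj : j < u.length) :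
    stepA (u ++ '#' :: v) j = stepA u j ++ '#' :: v := by
  have hd : (u ++ '#' :: v).drop j = u.drop j ++ '#' :: v := drop_append_le _ _ _ hj.le
  have hcu : u[j]? = some u[j] := List.getElem?_eq_getElem hj
  have hcs : (u ++ '#' :: v)[j]? = some u[j] := by rw [List.getElem?_append_left hj]; exact hcu
  have hgs : PySem.Chars.find ((u ++ '#' :: v).drop j) ['#'] = ((u.length - j : Nat) : Int) := by
    rw [hd]
    apply find_single_eq
    · rw [List.getElem?_append_right (by simp)]
      simp
    · intro m hm
      rw [List.getElem?_append_left (by simp; omega)]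
      intro hcontra
      exact hu (List.mem_of_mem_drop (List.mem_of_getElem? hcontra))
  by_cases hO : u[j] = 'O'
  · rw [stepA_skip_O _ _ (by rw [hcs, hO]), stepA_skip_O _ _ (by rw [hcu, hO])]
  · by_cases hm : 'O' ∈ u.drop j
    · have h0' : (u.drop j)[0]? = some u[j] := by
        rw [List.getElem?_drop]
        simpa using hcu
      obtain ⟨r, hf, hr1, hrlen, hOr, hmin⟩ := firstO (u.drop j) u[j] h0' hO hm
      rw [List.length_drop] at hrlen
      have hfs : PySem.Chars.find ((u ++ '#' :: v).drop j) ['O'] = (r : Int) := by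
        rw [hd]
        apply find_single_eq
        · rw [List.getElem?_append_left (by simp; omega)]
          exact hOr
        · intro m hm2
          rw [List.getElem?_append_left (by simp; omega)]
          exact hmin m hm2
      rw [stepA_fire _ _ r u[j] hcs hO hfs
            (Or.inr ⟨by rw [hgs]; omega, by rw [hgs]; omega⟩),
          stepA_fire u j r u[j] hcu hO hf
            (Or.inl (find_single_of_not_mem _ _ (fun h2 => hu (List.mem_of_mem_drop h2))))]
      have t1 : (u ++ '#' :: v).take j = u.take j := take_append_le _ _ _ hj.le
      have t2 : (u ++ '#' :: v).drop (j + 1) = u.drop (j + 1) ++ '#' :: v :=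
        drop_append_le _ _ _ (by omega)
      have t3 : ((u.drop (j + 1)) ++ '#' :: v).take (r - 1) = (u.drop (j + 1)).take (r - 1) :=
        take_append_le _ _ _ (by simp; omega)
      have t4 : (u ++ '#' :: v).drop (r + j + 1) = u.drop (r + j + 1) ++ '#' :: v :=
        drop_append_le _ _ _ (by omega)
      rw [t1, t2, t3, t4]
      simp [List.append_assoc]
    · have hf1 : PySem.Chars.find (u.drop j) ['O'] = -1 := find_single_of_not_mem _ _ hm
      by_cases hmv : 'O' ∈ v
      · obtain ⟨rv, hfv, hv1, hv2⟩ := find_single_mem v 'O' hmv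
        have hfs : PySem.Chars.find ((u ++ '#' :: v).drop j) ['O'] =
            (((u.length - j) + 1 + rv : Nat) : Int) := by
          rw [hd]
          apply find_single_eq
          · rw [List.getElem?_append_right (by simp; omega)]
            have e : u.length - j + 1 + rv - (u.drop j).length = rv + 1 := by simp; omega
            rw [e, List.getElem?_cons_succ]
            exact hv1
          · intro m hm2
            rcases Nat.lt_or_ge m (u.length - j) with h | h
            · rw [List.getElem?_append_left (by simp; omega)]
              intro hcontra
              exact hm (List.mem_of_getElem? hcontra)
            · rw [List.getElem?_append_right (by simp; omega)]
              rcases Nat.eq_or_lt_of_le h with h2 | h2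
              · have e : m - (u.drop j).length = 0 := by simp; omega
                rw [e]
                simp
              · have e : m - (u.drop j).length = (m - (u.length - j) - 1) + 1 := by simp; omega
                rw [e, List.getElem?_cons_succ]
                exact hv2 _ (by omega)
        rw [stepA_skip _ _ u[j] hcs hO
              (Or.inr ⟨by rw [hgs]; omega, Or.inr (by rw [hgs, hfs]; omega)⟩),
            stepA_skip u j u[j] hcu hO (Or.inl hf1)]
      · have hnm : 'O' ∉ (u ++ '#' :: v).drop j := by
          rw [hd]
          intro hcon
          rcases List.mem_append.mp hcon with h | h
          · exact hm h
          · rcases List.mem_cons.mp h with h | h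
            · exact absurd h (by decide)
            · exact hmv h
        rw [stepA_skip _ _ u[j] hcs hO (Or.inl (find_single_of_not_mem _ _ hnm)),
            stepA_skip u j u[j] hcu hO (Or.inl hf1)]

-- a step at the '#' itself does nothing
theorem stepA_at_hash (u v : List Char) : stepA (u ++ '#' :: v) u.length = u ++ '#' :: v := by
  have hd : (u ++ '#' :: v).drop u.length = '#' :: v := by
    rw [drop_append_le _ _ _ (Nat.le_refl _)]
    simp
  have hc : (u ++ '#' :: v)[u.length]? = some '#' := by
    rw [List.getElem?_append_right (Nat.le_refl _)]
    simp
  have hg : PySem.Chars.find ((u ++ '#' :: v).drop u.length) ['#'] = ((0 : Nat) : Int) := by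
    rw [hd]
    exact find_single_eq _ _ 0 (by simp) (by omega)
  exact stepA_skip _ _ '#' hc (by decide) (Or.inr ⟨by rw [hg]; decide, Or.inl (by rw [hg]; exact Int.le_refl 0)⟩)

-- a step past the '#' acts on the tail alone
theorem stepA_suffix (w v : List Char) (c : Char) (i : Nat) (hi : i < v.length) :
    stepA (w ++ c :: v) (w.length + 1 + i) = w ++ c :: stepA v i := by
  have hdrop : ∀ m : Nat, (w ++ c :: v).drop (w.length + 1 + m) = v.drop m := by
    intro m
    rw [List.drop_append, List.drop_eq_nil_of_le (by omega)]
    have e : w.length + 1 + m - w.length = m + 1 := by omega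
    rw [e]
    simp
  have hvi : v[i]? = some v[i] := List.getElem?_eq_getElem hi
  have hc2 : (w ++ c :: v)[w.length + 1 + i]? = some v[i] := by
    rw [List.getElem?_append_right (by omega)]
    have e : w.length + 1 + i - w.length = i + 1 := by omega
    rw [e, List.getElem?_cons_succ]
    exact hvi
  by_cases hO : v[i] = 'O'
  · rw [stepA_skip_O _ _ (by rw [hc2, hO]), stepA_skip_O _ _ (by rw [hvi, hO])]
  · by_cases hm : 'O' ∈ v.drop i
    · have h0' : (v.drop i)[0]? = some v[i] := by
        rw [List.getElem?_drop]
        simpa using hvi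
      obtain ⟨r, hf, hr1, hrlen, hOr, hmin⟩ := firstO (v.drop i) v[i] h0' hO hm
      by_cases hg : PySem.Chars.find (v.drop i) ['#'] = -1 ∨
          (0 < PySem.Chars.find (v.drop i) ['#'] ∧ (r : Int) < PySem.Chars.find (v.drop i) ['#'])
      · rw [stepA_fire _ _ r v[i] hc2 hO (by rw [hdrop i]; exact hf) (by rw [hdrop i]; exact hg),
            stepA_fire v i r v[i] hvi hO hf hg]
        have t1 : (w ++ c :: v).take (w.length + 1 + i) = w ++ c :: v.take i := by
          rw [List.take_append, List.take_of_length_le (by omega)]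
          have e : w.length + 1 + i - w.length = i + 1 := by omega
          rw [e]
          simp
        have t2 : (w ++ c :: v).drop (w.length + 1 + i + 1) = v.drop (i + 1) := by
          have e : w.length + 1 + i + 1 = w.length + 1 + (i + 1) := by omega
          rw [e, hdrop]
        have t3 : (w ++ c :: v).drop (r + (w.length + 1 + i) + 1) = v.drop (r + i + 1) := by
          have e : r + (w.length + 1 + i) + 1 = w.length + 1 + (r + i + 1) := by omega
          rw [e, hdrop]
        rw [t1, t2, t3]
        simp [List.append_assoc]
      · push Not at hg
        rw [stepA_skip _ _ v[i] hc2 hO ?_, stepA_skip v i v[i] hvi hO ?_]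
        · exact Or.inr ⟨hg.1, by rw [hf]; omega⟩
        · rw [hdrop i]
          exact Or.inr ⟨hg.1, by rw [hf]; omega⟩
    · have hf1 : PySem.Chars.find (v.drop i) ['O'] = -1 := find_single_of_not_mem _ _ hm
      rw [stepA_skip _ _ v[i] hc2 hO (Or.inl (by rw [hdrop i]; exact hf1)),
          stepA_skip v i v[i] hvi hO (Or.inl hf1)]

-- steps preserve length
theorem stepA_length (s : List Char) (j : Nat) (hj : j < s.length) :
    (stepA s j).length = s.length := by
  rcases h0 : s[j]? with _ | c
  · simp at h0
    omega
  · by_cases hO : c = 'O'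
    · rw [stepA_skip_O s j (hO ▸ h0)]
    · by_cases hm : 'O' ∈ s.drop j
      · have h0' : (s.drop j)[0]? = some c := by
          rw [List.getElem?_drop]
          simpa using h0
        obtain ⟨r, hf, hr1, hrlen, hOr, hmin⟩ := firstO (s.drop j) c h0' hO hm
        rw [List.length_drop] at hrlen
        by_cases hg : PySem.Chars.find (s.drop j) ['#'] = -1 ∨
            (0 < PySem.Chars.find (s.drop j) ['#'] ∧ (r : Int) < PySem.Chars.find (s.drop j) ['#'])
        · rw [stepA_fire s j r c h0 hO hf hg]
          simp [List.length_append, List.length_take, List.length_drop]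
          omega
        · push Not at hg
          rw [stepA_skip s j c h0 hO (Or.inr ⟨hg.1, ?_⟩)]
          rcases Int.lt_or_le 0 (PySem.Chars.find (s.drop j) ['#']) with h | h
          · exact Or.inr (by rw [hf]; omega)
          · exact Or.inl h
      · rw [stepA_skip s j c h0 hO (Or.inl (find_single_of_not_mem _ _ hm))]

theorem drop_split {a : Type} (A : List a) (x : a) (t : List a) (n : Nat) (h : A.length < n) :
    (A ++ x :: t).drop n = t.drop (n - A.length - 1) := by
  rw [List.drop_append, List.drop_eq_nil_of_le (by omega)]
  have e : n - A.length = (n - A.length - 1) + 1 := by omega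
  rw [e]
  simp

-- the invariant step inside one '#'-free segment
theorem stepA_seg (u : List Char) (j : Nat) (hu : '#' ∉ u) (hj : j < u.length)
    (hset : u.take j = (fillSeg u).take j) :
    '#' ∉ stepA u j ∧ (stepA u j).length = u.length ∧ fillSeg (stepA u j) = fillSeg u ∧
      (stepA u j).take (j + 1) = (fillSeg u).take (j + 1) := by
  have hcu : u[j]? = some u[j] := List.getElem?_eq_getElem hj
  have hkle := List.count_le_length (a := 'O') (l := u)
  have hcount_pref : (u.take j).count 'O' = min j (u.count 'O') := by
    rw [hset, fillSeg_take_count]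
  have hsplitc : (u.take j).count 'O' + (u.drop j).count 'O' = u.count 'O' := by
    rw [← List.count_append, List.take_append_drop]
  by_cases hO : u[j] = 'O'
  · have hjk : j < u.count 'O' := by
      have h1 : (u.take (j + 1)).count 'O' ≤ u.count 'O' := (List.take_sublist _ _).count_le _
      have h2 : u.take (j + 1) = u.take j ++ ['O'] := by
        rw [List.take_add_one, hcu, hO]
        rfl
      rw [h2, List.count_append] at h1
      have hone : List.count 'O' ['O'] = 1 := rfl
      omega
    rw [stepA_skip_O u j (hO ▸ hcu)]
    refine ⟨hu, rfl, rfl, ?_⟩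
    rw [List.take_add_one, hcu, hO, fillSeg_take_le u (j + 1) (by omega), hset,
      fillSeg_take_le u j (by omega)]
    simp [List.replicate_succ']
  · by_cases hm : 'O' ∈ u.drop j
    · -- the moving step
      have h0' : (u.drop j)[0]? = some u[j] := by
        rw [List.getElem?_drop]
        simpa using hcu
      obtain ⟨r, hf, hr1, hrlen, hOr, hmin⟩ := firstO (u.drop j) u[j] h0' hO hm
      rw [List.length_drop] at hrlen
      have hjk : j < u.count 'O' := by
        have h1 : 0 < (u.drop j).count 'O' := List.count_pos_iff.mpr hm
        omega
      have hqO : u[j + r]? = some 'O' := by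
        rw [← List.getElem?_drop]
        exact hOr
      -- decomposition of u around positions j and j + r
      have d2 : u.drop j = u[j] :: u.drop (j + 1) := List.drop_eq_getElem_cons hj
      have d4 : u.drop (r + j) = 'O' :: u.drop (r + j + 1) := by
        have hq : j + r < u.length := by omega
        rw [show r + j = j + r from by omega, List.drop_eq_getElem_cons hq]
        congr 1
        all_goals exact (List.getElem?_eq_some_iff.mp hqO).2
      have d3 : u.drop (j + 1) = (u.drop (j + 1)).take (r - 1) ++ 'O' :: u.drop (r + j + 1) := by
        conv_lhs => rw [← List.take_append_drop (r - 1) (u.drop (j + 1))]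
        rw [List.drop_drop, show j + 1 + (r - 1) = r + j from by omega, d4]
      have hA : u = u.take j ++ u[j] :: ((u.drop (j + 1)).take (r - 1) ++ 'O' :: u.drop (r + j + 1)) := by
        conv_lhs => rw [← List.take_append_drop j u, d2, d3]
      have hlenA : (u.take j).length = j := by simp; omega
      have hlenM : ((u.drop (j + 1)).take (r - 1)).length = r - 1 := by simp; omega
      have hMcount : ((u.drop (j + 1)).take (r - 1)).count 'O' = 0 := by
        rw [List.count_eq_zero]
        intro hmem
        obtain ⟨t, htlen, hte⟩ := List.mem_iff_getElem.mp hmem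
        rw [hlenM] at htlen
        have : ((u.drop (j + 1)).take (r - 1))[t]? = some 'O' := by
          rw [List.getElem?_eq_getElem (by rw [hlenM]; omega), hte]
        rw [List.getElem?_take_of_lt (by omega), List.getElem?_drop] at this
        have h2 : (u.drop j)[1 + t]? = some 'O' := by
          rw [List.getElem?_drop, show j + (1 + t) = j + 1 + t by omega]
          exact this
        exact hmin (1 + t) (by omega) h2
      rw [stepA_fire u j r u[j] hcu hO hf
        (Or.inl (find_single_of_not_mem _ _ (fun h2 => hu (List.mem_of_mem_drop h2))))]
      have hcnt : (u.take j ++ 'O' :: ((u.drop (j + 1)).take (r - 1) ++ '.' :: u.drop (r + j + 1))).count 'O'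
          = u.count 'O' := by
        conv_rhs => rw [hA]
        have c2 : (u[j] = 'O') = False := eq_false hO
        simp [List.count_append, c2]
        try omega
      refine ⟨?_, ?_, ?_, ?_⟩
      · intro hcon
        simp only [List.mem_append, List.mem_cons] at hcon
        rcases hcon with h | h | h
        · exact hu (List.mem_of_mem_take h)
        · exact absurd h (by decide)
        · rcases h with h | h | h
          · exact hu (List.mem_of_mem_drop (List.mem_of_mem_take h))
          · exact absurd h (by decide)
          · exact hu (List.mem_of_mem_drop h)
      · simp
        omega
      · -- fillSeg is unchanged by the move
        rw [fillSeg, fillSeg, hcnt]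
        congr 1
        rcases Nat.lt_or_ge (r + j) (u.count 'O') with hk | hk
        · -- the moved pair sits inside the replicate zone of both strings
          have eL : (u.take j ++ 'O' :: ((u.drop (j + 1)).take (r - 1) ++ '.' :: u.drop (r + j + 1))).drop (u.count 'O')
              = (u.drop (r + j + 1)).drop (u.count 'O' - j - 1 - (r - 1) - 1) := by
            rw [drop_split _ 'O' _ _ (by rw [hlenA]; omega), hlenA,
              drop_split _ '.' _ _ (by rw [hlenM]; omega), hlenM]
          have eR : ∀ n : Nat, j < n → r + j < n → u.drop n
              = (u.drop (r + j + 1)).drop (n - j - 1 - (r - 1) - 1) := by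
            intro n h1 h2
            conv_lhs => rw [hA]
            rw [drop_split _ (u[j]) _ _ (by rw [hlenA]; omega), hlenA,
              drop_split _ 'O' _ _ (by rw [hlenM]; omega), hlenM]
          rw [eL, eR (u.count 'O') (by omega) (by omega)]
        · -- the moved pair straddles position count: the tails agree after mapping
          have eL : (u.take j ++ 'O' :: ((u.drop (j + 1)).take (r - 1) ++ '.' :: u.drop (r + j + 1))).drop (u.count 'O')
              = ((u.drop (j + 1)).take (r - 1)).drop (u.count 'O' - j - 1) ++ '.' :: u.drop (r + j + 1) := by
            rw [drop_split _ 'O' _ _ (by rw [hlenA]; omega), hlenA,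
              drop_append_le _ _ _ (by rw [hlenM]; omega)]
          have eR : ∀ n : Nat, j < n → n ≤ r + j → u.drop n
              = ((u.drop (j + 1)).take (r - 1)).drop (n - j - 1) ++ 'O' :: u.drop (r + j + 1) := by
            intro n h1 h2
            conv_lhs => rw [hA]
            rw [drop_split _ (u[j]) _ _ (by rw [hlenA]; omega), hlenA,
              drop_append_le _ _ _ (by rw [hlenM]; omega)]
          rw [eL, eR (u.count 'O') (by omega) (by omega)]
          simp
      · -- the settled prefix grows by one 'O'
        rw [List.take_append, List.take_of_length_le (by rw [hlenA]; omega), hlenA,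
          show j + 1 - j = 1 from by omega, fillSeg_take_le u (j + 1) (by omega), hset,
          fillSeg_take_le u j (by omega)]
        simp [List.replicate_succ']
    · -- no 'O' right of j: no move, and position j already final
      rw [stepA_skip u j u[j] hcu hO (Or.inl (find_single_of_not_mem _ _ hm))]
      refine ⟨hu, rfl, rfl, ?_⟩
      have hzero : (u.drop j).count 'O' = 0 := by
        rw [List.count_eq_zero]
        exact hm
      have hk : u.count 'O' ≤ j := by omega
      rw [List.take_add_one, List.take_add_one, hset, hcu, fillSeg_getElem?_ge u j hk hj, if_neg hO]

-- ---- runs ----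

theorem segRun (d : Nat) : ∀ (j : Nat) (u : List Char), '#' ∉ u → j + d = u.length →
    u.take j = (fillSeg u).take j → (List.range' j d).foldl stepA u = fillSeg u := by
  induction d with
  | zero =>
    intro j u hu hlen hset
    obtain rfl : j = u.length := by omega
    calc (List.range' u.length 0).foldl stepA u = u := rfl
      _ = u.take u.length := (List.take_length).symm
      _ = (fillSeg u).take u.length := hset
      _ = (fillSeg u).take (fillSeg u).length := by rw [fillSeg_length]
      _ = fillSeg u := List.take_length
  | succ d ih =>
    intro j u hu hlen hset
    rw [List.range'_succ, List.foldl_cons]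
    obtain ⟨h1, h2, h3, h4⟩ := stepA_seg u j hu (by omega) hset
    rw [ih (j + 1) (stepA u j) h1 (by omega) (by rw [h3]; exact h4), h3]

theorem segRunV (d : Nat) : ∀ (j : Nat) (u v : List Char), '#' ∉ u → j + d = u.length →
    u.take j = (fillSeg u).take j →
    (List.range' j d).foldl stepA (u ++ '#' :: v) = fillSeg u ++ '#' :: v := by
  induction d with
  | zero =>
    intro j u v hu hlen hset
    obtain rfl : j = u.length := by omega
    have he : u = fillSeg u := by
      calc u = u.take u.length := (List.take_length).symm
        _ = (fillSeg u).take u.length := hset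
        _ = (fillSeg u).take (fillSeg u).length := by rw [fillSeg_length]
        _ = fillSeg u := List.take_length
    calc (List.range' u.length 0).foldl stepA (u ++ '#' :: v) = u ++ '#' :: v := rfl
      _ = fillSeg u ++ '#' :: v := by rw [← he]
  | succ d ih =>
    intro j u v hu hlen hset
    rw [List.range'_succ, List.foldl_cons, stepA_prefix u v j hu (by omega)]
    obtain ⟨h1, h2, h3, h4⟩ := stepA_seg u j hu (by omega) hset
    rw [ih (j + 1) (stepA u j) v h1 (by omega) (by rw [h3]; exact h4), h3]

theorem tailRun (idxs : List Nat) : ∀ (w v : List Char),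
    (∀ i ∈ idxs, i < v.length) →
    idxs.foldl (fun acc i => stepA acc (w.length + 1 + i)) (w ++ '#' :: v) =
      w ++ '#' :: idxs.foldl stepA v := by
  induction idxs with
  | nil => intro w v _; rfl
  | cons i rest ih =>
    intro w v hb
    have hi : i < v.length := hb i List.mem_cons_self
    rw [List.foldl_cons, stepA_suffix w v '#' i hi,
      ih w (stepA v i) (fun i2 hi2 => by
        rw [stepA_length v i hi]
        exact hb i2 (List.mem_cons_of_mem _ hi2))]
    rfl

theorem exists_first_hash (s : List Char) (h : '#' ∈ s) :
    ∃ u v, s = u ++ '#' :: v ∧ '#' ∉ u := by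
  induction s with
  | nil => cases h
  | cons c t ih =>
    by_cases hc : c = '#'
    · exact ⟨[], t, by rw [hc]; rfl, by simp⟩
    · have hm : '#' ∈ t := by
        rcases List.mem_cons.mp h with h2 | h2
        · exact absurd h2.symm hc
        · exact h2
      obtain ⟨u, v, he, hu⟩ := ih hm
      exact ⟨c :: u, v, by rw [he]; rfl, by
        intro hcon
        rcases List.mem_cons.mp hcon with h2 | h2
        · exact hc h2.symm
        · exact hu h2⟩

-- the core claim, on char lists
theorem run_eq_rollGo (s : List Char) :
    (List.range s.length).foldl stepA s = rollGo [] s := by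
  suffices H : ∀ n (t : List Char), t.length = n → (List.range t.length).foldl stepA t = rollGo [] t by
    exact H s.length s rfl
  intro n
  induction n using Nat.strong_induction_on with
  | _ n ih =>
    intro t hlen
    by_cases hm : '#' ∈ t
    · obtain ⟨u, v, rfl, hu⟩ := exists_first_hash t hm
      have hlen2 : (u ++ '#' :: v).length = u.length + 1 + v.length := by simp; omega
      have hsplit : List.range (u ++ '#' :: v).length =
          (List.range' 0 u.length ++ List.range' u.length 1) ++ List.range' (u.length + 1) v.length := by
        rw [List.range_eq_range', hlen2]
        rw [show u.length + 1 + v.length = (u.length + 1) + v.length from rfl]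
        rw [← List.range'_append (s := 0) (m := u.length + 1) (n := v.length) (step := 1)]
        rw [← List.range'_append (s := 0) (m := u.length) (n := 1) (step := 1)]
        simp
      rw [hsplit, List.foldl_append, List.foldl_append,
        segRunV u.length 0 u v hu (by omega) (by simp)]
      have hstep2 : (List.range' u.length 1).foldl stepA (fillSeg u ++ '#' :: v)
          = fillSeg u ++ '#' :: v := by
        have := stepA_at_hash (fillSeg u) v
        rw [fillSeg_length] at this
        simp [List.range'_one, this]
      rw [hstep2]
      have hstep3 : (List.range' (u.length + 1) v.length).foldl stepA (fillSeg u ++ '#' :: v)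
          = fillSeg u ++ '#' :: (List.range v.length).foldl stepA v := by
        rw [List.range'_eq_map_range, List.foldl_map]
        have hw : u.length + 1 = (fillSeg u).length + 1 := by rw [fillSeg_length]
        calc (List.range v.length).foldl (fun acc x => stepA acc (u.length + 1 + x)) (fillSeg u ++ '#' :: v)
            = (List.range v.length).foldl (fun acc x => stepA acc ((fillSeg u).length + 1 + x)) (fillSeg u ++ '#' :: v) := by
              rw [← fillSeg_length u]
          _ = fillSeg u ++ '#' :: (List.range v.length).foldl stepA v :=
              tailRun (List.range v.length) (fillSeg u) v (fun i hi => List.mem_range.mp hi)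
      rw [hstep3, ih v.length (by omega) v rfl, rollGo_split u [] v hu]
      simp
    · rw [List.range_eq_range', segRun t.length 0 t hm (by omega) (by simp), rollGo_no_hash t [] hm]
      simp

-- ===== VERDICT (by name: the statement is the Claim_ definition above) =====
theorem roll_row_west_spec : Claim_equal_roll_row_west := by
  intro row _
  unfold Spec_roll_row_west roll_row_west roll_row_west_alt
  simp only []
  rw [run_eq_rollGo]
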